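-- pv_equiv track=rewrite | github.com/he111z/L_W | L_W_05.py | f_iter
-- ===== SOURCE A (Python) =====
-- def f_iter(n):
--     if n <= 1:
--         return 3
--     prev = 3
--     for i in range(2, n + 1):
--         if i <= 23:
--             current = (i - 2) * prev
--         else:
--             current = 233 - prev - (i - 2)
--         prev = current
--     return prev
-- ===== SOURCE B (Python) =====
-- def f_iter(n):
--     # Closed form of the recurrence: the product phase collapses to zero,
--     # after which the values follow a parity-split arithmetic progression.
--     if n <= 1:
--         return 3
--     if n <= 23:
--         return 0
--     if n % 2 == 0:
--         return 223 - n // 2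
--     return (23 - n) // 2
-- ===== Notes on version B (the rewrite author's own statement) =====
-- stated objective: faster
-- what changed: Replaced the O(n) loop by an O(1) closed form: 0 for 2<=n<=23, then a parity-split arithmetic formula for n>=24.
import Mathlib
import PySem

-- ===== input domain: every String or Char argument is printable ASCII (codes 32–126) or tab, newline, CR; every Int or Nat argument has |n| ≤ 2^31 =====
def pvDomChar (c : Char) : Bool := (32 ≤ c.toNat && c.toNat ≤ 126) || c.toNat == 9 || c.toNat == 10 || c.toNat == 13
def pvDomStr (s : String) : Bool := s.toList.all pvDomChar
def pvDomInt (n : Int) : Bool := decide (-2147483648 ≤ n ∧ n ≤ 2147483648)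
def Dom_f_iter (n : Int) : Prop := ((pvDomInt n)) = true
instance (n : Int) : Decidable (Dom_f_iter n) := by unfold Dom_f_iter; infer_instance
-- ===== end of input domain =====

-- B replaces A's O(n) loop by an O(1) closed form (0 on 2..23, then a parity-split arithmetic formula).

-- ===== PORT A =====
-- loop body of A: prev -> current
def f_iterStep (prev i : Int) : Int :=
  if i ≤ 23 then (i - 2) * prev else 233 - prev - (i - 2)

def f_iter (n : Int) : Int :=
  if n ≤ 1 then 3
  else (PySem.List.pyRange 2 (n + 1) 1).foldl f_iterStep 3

-- ===== PORT B =====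
def f_iter_alt (n : Int) : Int :=
  if n ≤ 1 then 3
  else if n ≤ 23 then 0
  else if PySem.Int.mod n 2 = 0 then 223 - PySem.Int.floordiv n 2
  else PySem.Int.floordiv (23 - n) 2

-- ===== PRECONDITION & SPEC =====
def Spec_f_iter (n : Int) (out : Int) : Prop := out = f_iter_alt n
instance (n : Int) (out : Int) : Decidable (Spec_f_iter n out) := by unfold Spec_f_iter; infer_instance

-- ===== CLAIM (what is proved, stated in full; the proofs are below) =====
def Claim_equal_f_iter : Prop := ∀ (n : Int), Dom_f_iter n → Spec_f_iter n (f_iter n)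

-- ===== LEMMAS AND PROOFS =====

-- one loop step starting from B's closed form lands on B's closed form
lemma step_alt (m : Int) (h2 : 2 ≤ m) :
    f_iterStep (f_iter_alt m) (m + 1) = f_iter_alt (m + 1) := by
  unfold f_iterStep f_iter_alt
  simp only [PySem.Int.floordiv_eq_ediv_of_pos (by norm_num : (0:Int) < 2),
             PySem.Int.mod_eq_emod_of_pos (by norm_num : (0:Int) < 2)]
  split_ifs <;> omega

-- the fold over range(2, m+2) computes B's closed form, for every m = 2 + k
lemma fold_eq (k : Nat) :
    (PySem.List.pyRange 2 ((2 + (k : Int)) + 1) 1).foldl f_iterStep 3 = f_iter_alt (2 + (k : Int)) := by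
  induction k with
  | zero => decide
  | succ k ih =>
      have hcast : (2 + ((k + 1 : Nat) : Int)) + 1 = ((2 + (k : Int)) + 1) + 1 := by push_cast; ring
      rw [hcast, PySem.List.pyRange_one_succ_right (by omega : (2:Int) ≤ (2 + (k : Int)) + 1),
          List.foldl_append, List.foldl_cons, List.foldl_nil, ih,
          step_alt (2 + (k : Int)) (by omega)]
      congr 1

-- ===== VERDICT (by name: the statement is the Claim_ definition above) =====
theorem f_iter_spec : Claim_equal_f_iter := by
  intro n _
  unfold Spec_f_iter
  by_cases h : n ≤ 1
  · simp [f_iter, f_iter_alt, h]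
  · have hk : ∃ k : Nat, n = 2 + (k : Int) := ⟨(n - 2).toNat, by omega⟩
    obtain ⟨k, rfl⟩ := hk
    rw [f_iter, if_neg h, fold_eq]
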